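-- pv_equiv track=rewrite | github.com/thebluewhale/MachineLearning | IAMhwr/hwr/decoding/trie_beam_search.py | get_ending_alphas
-- ===== SOURCE A (Python) =====
-- def get_ending_alphas(text):
--     end_alphas = ""
--     for i in reversed(range(len(text))):
--         if text[i].isalpha():
--             end_alphas = text[i] + end_alphas
--         else:
--             break
--     return end_alphas
-- ===== SOURCE B (Python) =====
-- def get_ending_alphas(text):
--     boundary = 0
--     for i, c in enumerate(text):
--         if not c.isalpha():
--             boundary = i + 1
--     return text[boundary:]
-- ===== Notes on version B (the rewrite author's own statement) =====
-- stated objective: faster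
-- what changed: Replaces the backward scan-with-break that builds the result by repeated string prepending with a single forward pass maintaining the index just past the last non-alphabetic character, returning one final slice.
import Mathlib
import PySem

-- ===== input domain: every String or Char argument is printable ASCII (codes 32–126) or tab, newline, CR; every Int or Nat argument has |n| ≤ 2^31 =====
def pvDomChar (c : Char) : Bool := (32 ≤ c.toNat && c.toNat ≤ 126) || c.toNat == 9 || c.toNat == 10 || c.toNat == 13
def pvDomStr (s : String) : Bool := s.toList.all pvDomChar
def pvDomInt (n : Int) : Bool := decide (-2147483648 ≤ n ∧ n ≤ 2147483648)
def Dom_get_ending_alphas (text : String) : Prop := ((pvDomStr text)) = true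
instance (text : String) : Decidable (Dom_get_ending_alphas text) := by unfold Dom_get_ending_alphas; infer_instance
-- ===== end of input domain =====

-- B replaces A's backward scan-with-break and string prepending by one forward pass
-- maintaining a boundary index and a single final slice (objective: alternative).


-- ===== PORT A =====
-- for i in reversed(range(len(text))): visits the characters back to front;
-- the loop body prepends while isalpha and breaks at the first non-alpha.
def pvGoA : List Char → List Char → List Char
  | [], acc => acc
  | c :: rest, acc =>
    if PySem.Chars.isalpha c then pvGoA rest (c :: acc) else acc

def get_ending_alphas (text : String) : String :=
  String.ofList (pvGoA text.toList.reverse [])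

-- ===== PORT B =====
def get_ending_alphas_alt (text : String) : String :=
  String.ofList (PySem.Chars.slice text.toList
    (some ((PySem.List.enumerate text.toList 0).foldl
      (fun b ic => if ¬ PySem.Chars.isalpha ic.2 then ic.1 + 1 else b) 0)) none)

-- ===== PRECONDITION & SPEC =====
def Spec_get_ending_alphas (text : String) (out : String) : Prop := out = get_ending_alphas_alt text
instance (text : String) (out : String) : Decidable (Spec_get_ending_alphas text out) := by unfold Spec_get_ending_alphas; infer_instance

-- ===== CLAIM (what is proved, stated in full; the proofs are below) =====
def Claim_equal_get_ending_alphas : Prop := ∀ (text : String), Dom_get_ending_alphas text → Spec_get_ending_alphas text (get_ending_alphas text)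

-- ===== LEMMAS AND PROOFS =====

theorem pvGoA_eq (l acc : List Char) :
    pvGoA l acc = (l.takeWhile PySem.Chars.isalpha).reverse ++ acc := by
  induction l generalizing acc with
  | nil => simp [pvGoA]
  | cons c rest ih =>
    by_cases h : PySem.Chars.isalpha c
    · simp [pvGoA, h, ih]
    · simp [pvGoA, h]

theorem pvEnumerate_append_singleton {α : Type} (xs : List α) (x : α) (s : Int) :
    PySem.List.enumerate (xs ++ [x]) s
      = PySem.List.enumerate xs s ++ [(s + xs.length, x)] := by
  induction xs generalizing s with
  | nil => simp [PySem.List.enumerate_cons, PySem.List.enumerate_nil]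
  | cons y ys ih =>
    simp [PySem.List.enumerate_cons, ih]
    ring_nf

theorem pvBoundary_eq (cs : List Char) :
    (PySem.List.enumerate cs 0).foldl
      (fun b ic => if ¬ PySem.Chars.isalpha ic.2 then ic.1 + 1 else b) 0
    = ((cs.length - (cs.reverse.takeWhile PySem.Chars.isalpha).length : Nat) : Int) := by
  induction cs using List.reverseRecOn with
  | nil => simp [PySem.List.enumerate_nil]
  | append_singleton ys y ih =>
    rw [pvEnumerate_append_singleton, List.foldl_append]
    by_cases h : PySem.Chars.isalpha y
    · simp [h] at ih ⊢
      exact ih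
    · simp [h]

theorem get_ending_alphas_spec : Claim_equal_get_ending_alphas := by
  intro text _
  unfold Spec_get_ending_alphas get_ending_alphas get_ending_alphas_alt
  rw [pvGoA_eq, pvBoundary_eq]
  congr 1
  set cs := text.toList with hcs
  set t := List.takeWhile PySem.Chars.isalpha cs.reverse with ht
  set d := List.dropWhile PySem.Chars.isalpha cs.reverse with hd
  have hrev : t ++ d = cs.reverse := by
    rw [ht, hd]; exact List.takeWhile_append_dropWhile
  have hcs2 : cs = d.reverse ++ t.reverse := by
    have h2 := congrArg List.reverse hrev
    simpa using h2.symm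
  have hlen : cs.length - t.length = d.reverse.length := by
    have h3 := congrArg List.length hrev
    simp at h3 ⊢
    omega
  have hsl : PySem.Chars.slice cs (some ((cs.length - t.length : Nat) : Int)) none
      = cs.drop (cs.length - t.length) := by
    simp [PySem.Chars.slice_eq_listSlice, PySem.List.slice_from_natCast]
  rw [hsl, hlen]
  conv_rhs => rw [hcs2]
  rw [List.drop_left]
  simp
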